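-- pv_equiv track=rewrite | github.com/kdubb/solid-foundation | Tests/SolidTestsGen/shared.py | int_to_words
-- ===== SOURCE A (Python) =====
-- def int_to_words(n, word_size=64):
--     """Convert integer to little-endian hex word array"""
--     if n == 0:
--         return [0x0]
--
--     mask = (1 << word_size) - 1
--     words = []
--
--     while n > 0:
--         words.append(n & mask)
--         n >>= word_size
--
--     # remove trailing zeros if there is more than one word
--     while len(words) > 1 and words[-1] == 0:
--         words.pop()
--
--     return words
-- ===== SOURCE B (Python) =====
-- def int_to_words(n, word_size=64):
--     """Convert integer to little-endian hex word array"""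
--     if n == 0:
--         return [0x0]
--     mask = (1 << word_size) - 1
--     k = (n.bit_length() + word_size - 1) // word_size
--     return [(n >> (i * word_size)) & mask for i in range(k)]
-- ===== Notes on version B (the rewrite author's own statement) =====
-- stated objective: alternative
-- what changed: Replaces A's destructive shift-until-zero loop plus a trailing-zero popping pass by a closed-form word count k = ceil(bit_length/word_size) and an indexed comprehension extracting each word independently with (n >> i*word_size) & mask; Pre_ excludes negative n, a corner where A's empty list (while n>0 never runs) and B's two's-complement words are both accidental for a hex-word converter, and word_size <= 0 with n != 0, where A raises ValueError or loops forever.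
-- outside the precondition, e.g. on int_to_words(-5, 2): A returns [], B returns [3, 2]
import Mathlib
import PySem

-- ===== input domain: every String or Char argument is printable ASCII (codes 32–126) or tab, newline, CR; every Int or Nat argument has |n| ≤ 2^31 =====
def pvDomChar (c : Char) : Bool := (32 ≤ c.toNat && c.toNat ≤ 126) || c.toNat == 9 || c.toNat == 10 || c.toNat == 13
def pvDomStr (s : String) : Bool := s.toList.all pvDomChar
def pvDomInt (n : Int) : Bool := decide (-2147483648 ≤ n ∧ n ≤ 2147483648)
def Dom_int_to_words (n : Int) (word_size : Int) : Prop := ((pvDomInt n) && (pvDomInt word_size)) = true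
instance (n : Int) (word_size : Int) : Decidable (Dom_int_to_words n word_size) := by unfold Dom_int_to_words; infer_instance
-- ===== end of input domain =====

-- B replaces A's destructive shift-until-zero loop plus trailing-zero popping by a closed-form
-- word count k = ceil(bit_length/word_size) and an indexed comprehension; same return values on Pre_.

-- ===== PORT A =====
-- the 'while n > 0' loop; fuel = bitLength n bounds its iteration count on every input Pre_ admits
-- (each iteration shifts n right by word_size ≥ 1 bits), so the port computes exactly A's loop there
def loopA (mask : Int) (W : Nat) : Nat → Int → List Int → List Int
  | 0, _, words => words
  | fuel+1, n, words =>
      if 0 < n then loopA mask W fuel (n >>> W) (words ++ [PySem.Int.band n mask]) else words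

-- the 'while len(words) > 1 and words[-1] == 0: words.pop()' loop
def popTrailingA (l : List Int) : List Int :=
  if 1 < l.length ∧ PySem.List.pyGet? l (-1) = some 0 then popTrailingA l.dropLast else l
termination_by l.length
decreasing_by simp [List.length_dropLast]; omega

def int_to_words (n : Int) (word_size : Int) : List Int :=
  if n = 0 then [0]
  else
    -- '1 << word_size': Python raises ValueError for word_size < 0, excluded by Pre_
    let mask : Int := ((1 : Int) <<< word_size.toNat) - 1
    popTrailingA (loopA mask word_size.toNat (PySem.Int.bitLength n) n [])

-- ===== PORT B =====
def int_to_words_alt (n : Int) (word_size : Int) : List Int :=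
  if n = 0 then [0]
  else
    let mask : Int := ((1 : Int) <<< word_size.toNat) - 1
    let k : Int := PySem.Int.floordiv ((PySem.Int.bitLength n : Int) + word_size - 1) word_size
    (PySem.List.pyRange 0 k 1).map (fun i => PySem.Int.band (n >>> (i * word_size).toNat) mask)

-- ===== PRECONDITION & SPEC =====
-- Pre_ excludes word_size ≤ 0 with n ≠ 0, where A does not return (ValueError from '1 << word_size',
-- or the 'n >>= 0' loop never terminates), and negative n, a corner where A's empty list (the
-- 'while n > 0' loop never runs) and B's two's-complement words are both accidental values for a
-- converter of integers to hex word arrays.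
def Pre_int_to_words (n : Int) (word_size : Int) : Prop :=
  n = 0 ∨ (0 < n ∧ 1 ≤ word_size)
instance (n : Int) (word_size : Int) : Decidable (Pre_int_to_words n word_size) := by
  unfold Pre_int_to_words; infer_instance
def pvWitness_int_to_words : Int × Int := (5, 2)

def Spec_int_to_words (n : Int) (word_size : Int) (out : List Int) : Prop := out = int_to_words_alt n word_size
instance (n : Int) (word_size : Int) (out : List Int) : Decidable (Spec_int_to_words n word_size out) := by unfold Spec_int_to_words; infer_instance

-- ===== CLAIM (what is proved, stated in full; the proofs are below) =====
def Claim_equal_int_to_words : Prop := ∀ (n : Int) (word_size : Int), Dom_int_to_words n word_size → Pre_int_to_words n word_size → Spec_int_to_words n word_size (int_to_words n word_size)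

-- ===== LEMMAS AND PROOFS =====

lemma loopA_nonpos (mask : Int) (W fuel : Nat) (n : Int) (acc : List Int) (h : ¬ 0 < n) :
    loopA mask W fuel n acc = acc := by
  cases fuel <;> simp [loopA, h]

lemma loopA_acc (mask : Int) (W : Nat) :
    ∀ (fuel : Nat) (n : Int) (acc : List Int),
      loopA mask W fuel n acc = acc ++ loopA mask W fuel n [] := by
  intro fuel
  induction fuel with
  | zero => intro n acc; simp [loopA]
  | succ f ih =>
      intro n acc
      by_cases h : 0 < n
      · simp only [loopA, if_pos h]
        rw [ih (n >>> W) (acc ++ [PySem.Int.band n mask]), ih (n >>> W) ([] ++ [PySem.Int.band n mask])]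
        simp
      · simp [loopA, h]

lemma shift_toNat (n : Int) (h : 0 ≤ n) (W : Nat) : n >>> W = ((n.toNat >>> W : Nat) : Int) := by
  obtain ⟨m, rfl⟩ := Int.eq_ofNat_of_zero_le h
  simp [Int.shiftRight_eq]

lemma bl_pos {n : Int} (h : 0 < n) : 1 ≤ PySem.Int.bitLength n := by
  by_contra hb
  have h1 := PySem.Int.lt_two_pow_bitLength n
  have : PySem.Int.bitLength n = 0 := by omega
  rw [this] at h1
  simp at h1
  omega

lemma bl_eq {m b : Nat} (h1 : 2 ^ (b - 1) ≤ m) (h2 : m < 2 ^ b) (hb : 1 ≤ b) :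
    PySem.Int.bitLength (m : Int) = b := by
  have hm : 0 < m := lt_of_lt_of_le (Nat.two_pow_pos _) h1
  have hA := PySem.Int.lt_two_pow_bitLength (m : Int)
  have hB := PySem.Int.two_pow_bitLength_le (m : Int) (by exact_mod_cast hm.ne')
  rw [Int.natAbs_natCast] at hA hB
  set c := PySem.Int.bitLength (m : Int) with hc
  have hc1 : 1 ≤ c := bl_pos (by exact_mod_cast hm)
  have e1 : 2 ^ (c - 1) < 2 ^ b := lt_of_le_of_lt hB h2
  have e2 : 2 ^ (b - 1) < 2 ^ c := lt_of_le_of_lt h1 hA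
  have f1 : c - 1 < b := (Nat.pow_lt_pow_iff_right (by omega)).mp e1
  have f2 : b - 1 < c := (Nat.pow_lt_pow_iff_right (by omega)).mp e2
  omega

lemma shift_facts {n : Int} (hn : 0 < n) (W : Nat) :
    n >>> W = ((n.toNat / 2 ^ W : Nat) : Int) := by
  rw [shift_toNat n hn.le W, Nat.shiftRight_eq_div_pow]

lemma shift_eq_zero_iff {n : Int} (hn : 0 < n) (W : Nat) :
    n >>> W = 0 ↔ PySem.Int.bitLength n ≤ W := by
  have hA := PySem.Int.lt_two_pow_bitLength n
  have hB := PySem.Int.two_pow_bitLength_le n (by omega)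
  have hna : n.natAbs = n.toNat := by omega
  rw [hna] at hA hB
  rw [shift_facts hn W]
  constructor
  · intro h
    have : n.toNat / 2 ^ W = 0 := by exact_mod_cast h
    have hlt : n.toNat < 2 ^ W := Nat.lt_of_div_eq_zero (Nat.two_pow_pos _) this
    have : 2 ^ (PySem.Int.bitLength n - 1) < 2 ^ W := lt_of_le_of_lt hB hlt
    have := (Nat.pow_lt_pow_iff_right (by omega : 1 < 2)).mp this
    have := bl_pos hn
    omega
  · intro h
    have : n.toNat < 2 ^ W := lt_of_lt_of_le hA (Nat.pow_le_pow_right (by omega) h)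
    have : n.toNat / 2 ^ W = 0 := Nat.div_eq_of_lt this
    simp [this]

lemma bl_shift {n : Int} (hn : 0 < n) (W : Nat) (h : 0 < n >>> W) :
    PySem.Int.bitLength (n >>> W) = PySem.Int.bitLength n - W ∧ W < PySem.Int.bitLength n := by
  have hA := PySem.Int.lt_two_pow_bitLength n
  have hB := PySem.Int.two_pow_bitLength_le n (by omega)
  have hna : n.natAbs = n.toNat := by omega
  rw [hna] at hA hB
  set b := PySem.Int.bitLength n with hb
  have hb1 : 1 ≤ b := bl_pos hn
  have hWb : W < b := by
    by_contra hc
    have : n >>> W = 0 := (shift_eq_zero_iff hn W).mpr (by omega)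
    omega
  have hm' : 0 < n.toNat / 2 ^ W := by
    have := shift_facts hn W
    omega
  have hup : n.toNat / 2 ^ W < 2 ^ (b - W) := by
    rw [Nat.div_lt_iff_lt_mul (Nat.two_pow_pos _), ← pow_add]
    have : b - W + W = b := by omega
    rw [this]; exact hA
  have hlo : 2 ^ (b - W - 1) ≤ n.toNat / 2 ^ W := by
    rw [Nat.le_div_iff_mul_le (Nat.two_pow_pos _), ← pow_add]
    have : b - W - 1 + W = b - 1 := by omega
    rw [this]; exact hB
  rw [shift_facts hn W]
  exact ⟨bl_eq hlo hup (by omega), hWb⟩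

lemma shift_add (n : Int) (h : 0 ≤ n) (a b : Nat) : n >>> (a + b) = (n >>> a) >>> b := by
  obtain ⟨m, rfl⟩ := Int.eq_ofNat_of_zero_le h
  have e : ∀ (p k : Nat), ((p : Int)) >>> k = ((p >>> k : Nat) : Int) := fun p k => by
    simp [Int.shiftRight_eq]
  rw [e, e, e, Nat.shiftRight_add]

-- A's loop output, characterised as B's indexed comprehension over List.range
lemma loopA_eq (W : Nat) (hW : 1 ≤ W) (mask : Int) :
    ∀ (fuel : Nat) (n : Int), 0 < n → PySem.Int.bitLength n ≤ fuel →
      loopA mask W fuel n [] =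
        (List.range ((PySem.Int.bitLength n + W - 1) / W)).map
          (fun i => PySem.Int.band (n >>> (i * W)) mask) := by
  intro fuel
  induction fuel with
  | zero => intro n hn hf; have := bl_pos hn; omega
  | succ f ih =>
      intro n hn hf
      set b := PySem.Int.bitLength n with hb
      have hb1 : 1 ≤ b := bl_pos hn
      simp only [loopA, if_pos hn]
      rw [loopA_acc]
      by_cases h' : 0 < n >>> W
      · obtain ⟨hbl', hWb⟩ := bl_shift hn W h'
        have hf' : PySem.Int.bitLength (n >>> W) ≤ f := by omega
        rw [ih (n >>> W) h' hf', hbl']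
        have hk' : (b - W + W - 1) / W = (b - 1) / W := by
          congr 1; omega
        have hk : (b + W - 1) / W = (b - 1) / W + 1 := by
          have : b + W - 1 = (b - 1) + W := by omega
          rw [this, Nat.add_div_right _ (by omega)]
        rw [hk', hk, List.range_succ_eq_map, List.map_cons, List.map_map]
        simp only [List.nil_append, List.singleton_append, Nat.zero_mul, Int.shiftRight_zero]
        congr 1
        apply List.map_congr_left
        intro i _
        simp only [Function.comp_apply, Nat.succ_eq_add_one]
        have h1 : (i + 1) * W = W + i * W := by ring
        rw [h1, shift_add n hn.le W (i * W)]
      · rw [loopA_nonpos _ _ _ _ _ h']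
        have hzero : n >>> W = 0 := by
          have : 0 ≤ n >>> W := by rw [shift_facts hn W]; positivity
          omega
        have hbW : b ≤ W := (shift_eq_zero_iff hn W).mp hzero
        have hk : (b + W - 1) / W = 1 := by
          apply Nat.div_eq_of_lt_le <;> omega
        rw [hk]
        simp

-- the last word A appends is nonzero, so the trailing-zero popping never fires
lemma last_word_ne_zero {n : Int} (hn : 0 < n) (W : Nat) (hW : 1 ≤ W) :
    PySem.Int.band (n >>> (((PySem.Int.bitLength n + W - 1) / W - 1) * W)) (((1 : Int) <<< W) - 1) ≠ 0 := by
  have hA := PySem.Int.lt_two_pow_bitLength n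
  have hB := PySem.Int.two_pow_bitLength_le n (by omega)
  have hna : n.natAbs = n.toNat := by omega
  rw [hna] at hA hB
  set b := PySem.Int.bitLength n with hb
  have hb1 : 1 ≤ b := bl_pos hn
  set k := (b + W - 1) / W with hk
  have hdm := Nat.div_add_mod (b + W - 1) W
  rw [← hk] at hdm
  have hmod : (b + W - 1) % W < W := Nat.mod_lt _ (by omega)
  have hk1 : 1 ≤ k := by
    rw [hk, Nat.one_le_div_iff (by omega)]; omega
  have hsub : (k - 1) * W = W * k - W := by
    cases k with
    | zero => omega
    | succ k' => rw [Nat.succ_sub_one, Nat.mul_succ, Nat.mul_comm k' W]; omega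
  have hkW1 : b ≤ W * k := by omega
  have hkW2 : (k - 1) * W ≤ b - 1 := by omega
  set m'' := n.toNat / 2 ^ ((k - 1) * W) with hm''
  have hlow : 1 ≤ m'' := by
    rw [hm'', Nat.one_le_div_iff (Nat.two_pow_pos _)]
    calc 2 ^ ((k - 1) * W) ≤ 2 ^ (b - 1) := Nat.pow_le_pow_right (by omega) hkW2
      _ ≤ n.toNat := hB
  have hhigh : m'' < 2 ^ W := by
    rw [hm'', Nat.div_lt_iff_lt_mul (Nat.two_pow_pos _), ← pow_add]
    calc n.toNat < 2 ^ b := hA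
      _ ≤ 2 ^ (W + (k - 1) * W) := by
          apply Nat.pow_le_pow_right (by omega)
          omega
  have hmask : ((1:Int) <<< W) - 1 = ((2 ^ W - 1 : Nat) : Int) := by
    have h2 : (1:Int) <<< W = ((2 ^ W : Nat) : Int) := by simp [Int.shiftLeft_eq]
    have h3 : 1 ≤ 2 ^ W := Nat.one_le_two_pow
    rw [h2]; push_cast [h3]; ring
  rw [shift_facts hn ((k - 1) * W), hmask, ← hm'',
      PySem.Int.band_of_nonneg (by positivity) (by positivity)]
  simp only [Int.toNat_natCast]
  rw [Nat.and_two_pow_sub_one_eq_mod, Nat.mod_eq_of_lt hhigh]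
  exact_mod_cast by omega

lemma popTrailingA_id (l : List Int) (h : PySem.List.pyGet? l (-1) ≠ some 0) :
    popTrailingA l = l := by
  rw [popTrailingA]
  simp [h]

lemma pyGet_last_append (l : List Int) (x : Int) :
    PySem.List.pyGet? (l ++ [x]) (-1) = some x := by
  simp [PySem.List.pyGet?, PySem.List.pyIdx?]

-- ===== VERDICT (by name: the statement is the Claim_ definition above) =====
theorem int_to_words_spec : Claim_equal_int_to_words := by
  intro n word_size _hdom hpre
  unfold Spec_int_to_words int_to_words int_to_words_alt
  simp only []
  by_cases h0 : n = 0
  · simp [h0]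
  · rw [if_neg h0, if_neg h0]
    have hn : 0 < n := by rcases hpre with h | ⟨h, _⟩ <;> omega
    have hws : 1 ≤ word_size := by rcases hpre with h | ⟨_, h⟩ <;> omega
    set W := word_size.toNat with hWdef
    have hW : 1 ≤ W := by omega
    have hwsW : word_size = (W : Int) := by omega
    set b := PySem.Int.bitLength n with hb
    have hb1 : 1 ≤ b := bl_pos hn
    set mask : Int := ((1 : Int) <<< W) - 1 with hmask
    set k := (b + W - 1) / W with hk
    -- the Int word count equals the Nat one
    have hkint : PySem.Int.floordiv ((b : Int) + word_size - 1) word_size = ((k : Int)) := by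
      rw [hwsW]
      have h1 : ((b : Int) + (W : Int) - 1) = ((b + W - 1 : Nat) : Int) := by omega
      rw [h1, PySem.Int.floordiv, Int.fdiv_eq_ediv_of_nonneg _ (by positivity)]
      exact_mod_cast (Int.natCast_div _ _).symm
    -- B's comprehension over pyRange equals the List.range form
    have hrange : (PySem.List.pyRange 0 (k : Int) 1).map
          (fun i => PySem.Int.band (n >>> (i * word_size).toNat) mask)
        = (List.range k).map (fun i => PySem.Int.band (n >>> (i * W)) mask) := by
      rw [PySem.List.pyRange_one, List.map_map]
      have hkn : ((k : Int) - 0).toNat = k := by simp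
      rw [hkn]
      apply List.map_congr_left
      intro i _
      simp only [Function.comp_apply]
      congr 1
      rw [hwsW]
      have : ((0 : Int) + (i : Int)) * (W : Int) = ((i * W : Nat) : Int) := by push_cast; ring
      rw [this, Int.toNat_natCast]
    rw [hkint, hrange, loopA_eq W hW mask b n hn (le_refl b), ← hk]
    -- popTrailingA is the identity: the last word is nonzero
    have hk1 : 1 ≤ k := by
      rw [hk, Nat.one_le_div_iff (by omega)]; omega
    have hsplit : List.range k = List.range (k - 1) ++ [k - 1] := by
      conv_lhs => rw [show k = (k - 1) + 1 by omega]
      exact List.range_succ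
    rw [hsplit, List.map_append, List.map_singleton]
    exact popTrailingA_id _ (by
      rw [pyGet_last_append]
      intro hcontra
      exact last_word_ne_zero hn W hW (by simpa using hcontra))
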